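-- pv_equiv track=rewrite | github.com/wade-code/python-misc | sar.py | sar16
-- ===== SOURCE A (Python) =====
-- def sar16(x, m):
--   if x & 0x8000 != 0:
--     filler = 0
--     for i in range(m):
--       filler |= 1 << 15-i
--     x = (x >> m) | filler
--     return x
--   else:
--     return x >> m
-- ===== SOURCE B (Python) =====
-- def sar16(x, m):
--   if x & 0x8000 != 0:
--     return (x >> m) | (((1 << m) - 1) << (16 - m))
--   else:
--     return x >> m
-- ===== Notes on version B (the rewrite author's own statement) =====
-- stated objective: simpler
-- what changed: The per-bit loop that ORs together 1<<(15-i) is replaced by the closed-form mask ((1<<m)-1)<<(16-m), removing the loop entirely.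
import Mathlib
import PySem

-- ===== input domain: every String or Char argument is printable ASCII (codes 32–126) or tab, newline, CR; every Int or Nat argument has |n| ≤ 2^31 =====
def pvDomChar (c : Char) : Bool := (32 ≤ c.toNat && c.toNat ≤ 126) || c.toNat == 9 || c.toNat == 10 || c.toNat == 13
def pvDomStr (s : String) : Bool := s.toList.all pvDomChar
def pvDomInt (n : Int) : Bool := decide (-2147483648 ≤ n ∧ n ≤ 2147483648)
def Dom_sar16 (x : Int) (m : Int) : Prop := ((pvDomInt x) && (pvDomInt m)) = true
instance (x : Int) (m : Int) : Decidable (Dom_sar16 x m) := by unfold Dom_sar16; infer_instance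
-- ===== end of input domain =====

-- B replaces A's per-bit OR loop by the closed-form mask ((1<<m)-1)<<(16-m): simpler, no loop.

-- ===== PORT A =====
def sar16 (x : Int) (m : Int) : Int :=
  if PySem.Int.band x 0x8000 ≠ 0 then
    let filler := (PySem.List.pyRange 0 m 1).foldl
      (fun filler i => PySem.Int.bor filler ((1 : Int) <<< ((15 : Int) - i).toNat)) 0
    PySem.Int.bor (x >>> m.toNat) filler
  else
    x >>> m.toNat

-- ===== PORT B =====
def sar16_alt (x : Int) (m : Int) : Int :=
  if PySem.Int.band x 0x8000 ≠ 0 then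
    PySem.Int.bor (x >>> m.toNat) ((((1 : Int) <<< m.toNat) - 1) <<< ((16 : Int) - m).toNat)
  else
    x >>> m.toNat

-- ===== PRECONDITION & SPEC =====
-- Pre: Python raises ValueError on a negative shift count (m < 0 in either branch),
-- and in the sign-set branch on m > 16 (the loop reaches 1 << (15-16), a negative shift).
def Pre_sar16 (x : Int) (m : Int) : Prop := 0 ≤ m ∧ (PySem.Int.band x 0x8000 ≠ 0 → m ≤ 16)
instance (x : Int) (m : Int) : Decidable (Pre_sar16 x m) := by unfold Pre_sar16; infer_instance
def pvWitness_sar16 : Int × Int := (0x8123, 3)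
def Spec_sar16 (x : Int) (m : Int) (out : Int) : Prop := out = sar16_alt x m
instance (x : Int) (m : Int) (out : Int) : Decidable (Spec_sar16 x m out) := by unfold Spec_sar16; infer_instance

-- ===== CLAIM (what is proved, stated in full; the proofs are below) =====
def Claim_equal_sar16 : Prop := ∀ (x : Int) (m : Int), Dom_sar16 x m → Pre_sar16 x m → Spec_sar16 x m (sar16 x m)

-- ===== LEMMAS AND PROOFS =====
-- The filler only depends on m; for each m in 0..16 both sides are closed Int computations.
theorem filler_closed_form (m : Int) (h0 : 0 ≤ m) (h16 : m ≤ 16) :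
    (PySem.List.pyRange 0 m 1).foldl
      (fun filler i => PySem.Int.bor filler ((1 : Int) <<< ((15 : Int) - i).toNat)) 0
    = (((1 : Int) <<< m.toNat) - 1) <<< ((16 : Int) - m).toNat := by
  interval_cases m <;> decide

-- ===== VERDICT (by name: the statement is the Claim_ definition above) =====
theorem sar16_spec : Claim_equal_sar16 := by
  intro x m _ hpre
  unfold Spec_sar16 sar16 sar16_alt
  by_cases h : PySem.Int.band x 0x8000 ≠ 0
  · simp only [if_pos h]
    rw [filler_closed_form m hpre.1 (hpre.2 h)]
  · simp only [if_neg h]
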